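-- pv_equiv track=rewrite | github.com/kraker/sips-and-steals | generate_site.py | format_day_range
-- ===== SOURCE A (Python) =====
-- def format_day_range(days):
--     """Format a list of days into compact ranges using numeric day detection"""
--     if not days:
--         return ""
--
--     # Define day mappings
--     day_to_num = {
--         'monday': 1, 'tuesday': 2, 'wednesday': 3, 'thursday': 4,
--         'friday': 5, 'saturday': 6, 'sunday': 7
--     }
--
--     num_to_abbrev = {
--         1: 'Mon', 2: 'Tue', 3: 'Wed', 4: 'Thu',
--         5: 'Fri', 6: 'Sat', 7: 'Sun'
--     }
--
--     # Convert days to numbers, normalize, and remove duplicates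
--     day_numbers = []
--     for day in days:
--         day_lower = day.lower().strip()
--         if day_lower in day_to_num:
--             day_numbers.append(day_to_num[day_lower])
--
--     if not day_numbers:
--         return ", ".join(days)  # Fallback if we can't parse
--
--     # Remove duplicates and sort
--     unique_numbers = sorted(set(day_numbers))
--
--     # Special case: all 7 days
--     if len(unique_numbers) == 7:
--         return "Daily"
--
--     # Handle week wraparound by checking for Sunday-Monday sequences
--     # For cases like [1,2,3,7] (Mon,Tue,Wed,Sun) or [6,7,1,2] (Sat,Sun,Mon,Tue)
--     ranges = []
--     wraparound_handled = False
--     if 7 in unique_numbers and 1 in unique_numbers: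
--         # Check if we have a sequence that wraps around (like Sun-Thu)
--         # Find Sunday and see if it connects to a sequence starting with Monday
--         sunday_idx = unique_numbers.index(7)
--         monday_idx = unique_numbers.index(1)
--
--         # If Sunday is at the end and Monday is at the beginning, and they're part of consecutive sequences
--         if sunday_idx == len(unique_numbers) - 1 and monday_idx == 0:
--             # Check if we have a sequence like [1,2,3,4,7] (Mon-Thu,Sun)
--             # This should be displayed as "Sun - Thu"
--             consecutive_from_monday = 0
--             while (consecutive_from_monday + 1 < len(unique_numbers) and
--                    unique_numbers[consecutive_from_monday + 1] == unique_numbers[consecutive_from_monday] + 1 and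
--                    unique_numbers[consecutive_from_monday] < 7):
--                 consecutive_from_monday += 1
--
--             # If we have Monday through some weekday, then Sunday, it's a wraparound
--             if consecutive_from_monday > 0 and unique_numbers[consecutive_from_monday + 1] == 7:
--                 ranges.append(f"Sun - {num_to_abbrev[unique_numbers[consecutive_from_monday]]}")
--                 wraparound_handled = True
--
--     if not wraparound_handled:
--         # Standard consecutive range detection
--         i = 0
--
--         while i < len(unique_numbers):
--             start = i
--
--             # Find consecutive sequence
--             while (i + 1 < len(unique_numbers) and
--                    unique_numbers[i + 1] == unique_numbers[i] + 1):
--                 i += 1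
--
--             # Format the range
--             if i == start:
--                 # Single day
--                 ranges.append(num_to_abbrev[unique_numbers[start]])
--             elif i == start + 1:
--                 # Two consecutive days, show as range for brevity
--                 ranges.append(f"{num_to_abbrev[unique_numbers[start]]} - {num_to_abbrev[unique_numbers[i]]}")
--             else:
--                 # Three or more consecutive days, definitely a range
--                 ranges.append(f"{num_to_abbrev[unique_numbers[start]]} - {num_to_abbrev[unique_numbers[i]]}")
--
--             i += 1
--
--     return ", ".join(ranges)
-- ===== SOURCE B (Python) =====
-- def format_day_range(days):
--     """Format a list of days into compact abbreviated ranges via a 7-bit day mask."""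
--     if not days:
--         return ""
--     day_to_num = {
--         'monday': 1, 'tuesday': 2, 'wednesday': 3, 'thursday': 4,
--         'friday': 5, 'saturday': 6, 'sunday': 7
--     }
--     abbrev = ['Mon', 'Tue', 'Wed', 'Thu', 'Fri', 'Sat', 'Sun']
--     mask = 0
--     for day in days:
--         d = day.lower().strip()
--         if d in day_to_num:
--             mask |= 1 << (day_to_num[d] - 1)
--     if mask == 0:
--         return ", ".join(days)  # nothing parsed
--     if mask == 127:
--         return "Daily"
--     low = mask & 63
--     # wraparound: bits are exactly Mon..k (k>=2) plus Sunday
--     if mask & 64 and low >= 3 and low & (low + 1) == 0: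
--         return f"Sun - {abbrev[low.bit_length() - 1]}"
--     parts = []
--     start = None
--     for d in range(1, 8):
--         if mask >> (d - 1) & 1:
--             if start is None:
--                 start = d
--             if not mask >> d & 1:
--                 parts.append(abbrev[start - 1] if d == start
--                              else f"{abbrev[start - 1]} - {abbrev[d - 1]}")
--                 start = None
--     return ", ".join(parts)
-- ===== Notes on version B (the rewrite author's own statement) =====
-- stated objective: alternative
-- what changed: B never builds or sorts a list of day numbers: it accumulates a 7-bit mask, decides the wraparound case by mask arithmetic (low bits form 2^k-1 with Sunday's bit set), and emits runs with a fixed 7-step bit scan, where A sorts a deduplicated list and walks it with nested index-cursor while loops.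
import Mathlib
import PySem

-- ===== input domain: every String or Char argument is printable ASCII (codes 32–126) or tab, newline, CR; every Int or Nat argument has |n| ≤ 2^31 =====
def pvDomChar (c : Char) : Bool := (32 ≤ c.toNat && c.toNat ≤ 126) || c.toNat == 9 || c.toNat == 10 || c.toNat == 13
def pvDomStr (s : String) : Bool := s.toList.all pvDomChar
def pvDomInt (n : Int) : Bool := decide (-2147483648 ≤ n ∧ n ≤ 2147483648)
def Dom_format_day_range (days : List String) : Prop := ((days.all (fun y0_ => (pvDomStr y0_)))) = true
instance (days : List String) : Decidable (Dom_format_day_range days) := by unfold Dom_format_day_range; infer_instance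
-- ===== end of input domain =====

-- B replaces A's sorted-deduplicated list and its index-cursor while loops by a 7-bit day mask:
-- the wraparound case is a mask-arithmetic test and runs are emitted by a fixed 7-step bit scan
-- (objective: alternative algorithm/data structure of similar cost).

-- ===== PORT A =====
def aDayToNum : PySem.Dict String Int :=
  PySem.Dict.ofList [("monday",1),("tuesday",2),("wednesday",3),("thursday",4),
                     ("friday",5),("saturday",6),("sunday",7)]

def aNumToAbbrev : PySem.Dict Int String :=
  PySem.Dict.ofList [(1,"Mon"),(2,"Tue"),(3,"Wed"),(4,"Thu"),(5,"Fri"),(6,"Sat"),(7,"Sun")]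

-- the 'while' computing consecutive_from_monday (fuel = len(u) bounds the iteration count;
-- each pass moves c forward, so the budget is never exhausted before the loop condition fails)
def aConsec (u : List Int) : Nat → Nat → Nat
  | 0, c => c
  | fuel+1, c =>
    if c + 1 < u.length ∧ u.getD (c+1) 0 = u.getD c 0 + 1 ∧ u.getD c 0 < 7
    then aConsec u fuel (c+1) else c

-- the inner 'while' of the standard range detection: advance i while consecutive (fuel = len(u))
def aRunEnd (u : List Int) : Nat → Nat → Nat
  | 0, i => i
  | fuel+1, i =>
    if i + 1 < u.length ∧ u.getD (i+1) 0 = u.getD i 0 + 1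
    then aRunEnd u fuel (i+1) else i

-- the outer 'while i < len(unique_numbers)' loop building `ranges` (fuel = len(u) ≥ iteration count)
def aRanges (u : List Int) : Nat → Nat → List String → List String
  | 0, _, ranges => ranges
  | fuel+1, i, ranges =>
    if i < u.length then
      let start := i
      let j := aRunEnd u u.length i
      let r :=
        if j = start then aNumToAbbrev.getD (u.getD start 0) ""
        else if j = start + 1 then
          aNumToAbbrev.getD (u.getD start 0) "" ++ " - " ++ aNumToAbbrev.getD (u.getD j 0) ""
        else
          aNumToAbbrev.getD (u.getD start 0) "" ++ " - " ++ aNumToAbbrev.getD (u.getD j 0) ""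
      aRanges u fuel (j + 1) (ranges ++ [r])
    else ranges

-- everything from `unique_numbers = sorted(set(day_numbers))` on, as a function of that list
def aFormatNums (u : List Int) : String :=
  if u.length = 7 then "Daily"
  else
    -- wraparound block; `none` = wraparound_handled stayed False
    let wrap : Option String :=
      if (7:Int) ∈ u ∧ (1:Int) ∈ u then
        let sunday_idx := (PySem.List.index? u 7).getD 0   -- .index: element is present, so getD default unreachable
        let monday_idx := (PySem.List.index? u 1).getD 0
        if sunday_idx = u.length - 1 ∧ monday_idx = 0 then
          let c := aConsec u u.length 0
          if 0 < c ∧ u.getD (c+1) 0 = 7 then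
            some ("Sun - " ++ aNumToAbbrev.getD (u.getD c 0) "")
          else none
        else none
      else none
    match wrap with
    | some r => PySem.Str.join ", " [r]
    | none => PySem.Str.join ", " (aRanges u u.length 0 [])

def format_day_range (days : List String) : String :=
  if days = [] then ""
  else
    let day_numbers := days.foldl (fun acc day =>
      if aDayToNum.contains (PySem.Str.strip (PySem.Str.lower day))
      then acc ++ [aDayToNum.getD (PySem.Str.strip (PySem.Str.lower day)) 0]
      else acc) []
    if day_numbers = [] then PySem.Str.join ", " days
    else aFormatNums (PySem.List.sorted (PySem.Set.ofList day_numbers) (fun x => x) false)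

-- ===== PORT B =====
def bDayToNum : PySem.Dict String Int :=
  PySem.Dict.ofList [("monday",1),("tuesday",2),("wednesday",3),("thursday",4),
                     ("friday",5),("saturday",6),("sunday",7)]

def bAbbrev : List String := ["Mon","Tue","Wed","Thu","Fri","Sat","Sun"]

-- mask |= 1 << (day_to_num[d] - 1); dict values are 1..7, so the shift amount v-1 is ≥ 0 and .toNat is exact
def bBit (v : Int) : Nat := 1 <<< (v - 1).toNat

-- one iteration of B's `for d in range(1, 8)` bit scan, state = (start, parts);
-- shift amounts d-1 and d are 0..7 here, so .toNat is exact
def bScanStep (mask : Nat) (st : Option Int × List String) (d : Int) : Option Int × List String :=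
  if (mask >>> (d - 1).toNat) &&& 1 = 1 then
    let start := st.1.getD d                      -- 'if start is None: start = d'
    if (mask >>> d.toNat) &&& 1 = 1 then (some start, st.2)
    else (none, st.2 ++ [if d = start then PySem.List.pyGetD bAbbrev (start - 1) ""
                         else PySem.List.pyGetD bAbbrev (start - 1) "" ++ " - " ++
                              PySem.List.pyGetD bAbbrev (d - 1) ""])
  else st

-- everything after the mask is built, as a function of the mask
def bFormatMask (mask : Nat) : String :=
  if mask = 127 then "Daily"
  else
    let low := mask &&& 63
    if mask &&& 64 ≠ 0 ∧ 3 ≤ low ∧ low &&& (low + 1) = 0 then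
      "Sun - " ++ PySem.List.pyGetD bAbbrev ((PySem.Int.bitLength (low : Int) : Int) - 1) ""
    else
      PySem.Str.join ", " ((PySem.List.pyRange 1 8 1).foldl (bScanStep mask) (none, [])).2

def format_day_range_alt (days : List String) : String :=
  if days = [] then ""
  else
    let mask := days.foldl (fun m day =>
      let d := PySem.Str.strip (PySem.Str.lower day)
      if bDayToNum.contains d then m ||| bBit (bDayToNum.getD d 0) else m) 0
    if mask = 0 then PySem.Str.join ", " days   -- nothing parsed
    else bFormatMask mask

-- ===== PRECONDITION & SPEC =====
def Spec_format_day_range (days : List String) (out : String) : Prop := out = format_day_range_alt days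
instance (days : List String) (out : String) : Decidable (Spec_format_day_range days out) := by unfold Spec_format_day_range; infer_instance

-- ===== CLAIM (what is proved, stated in full; the proofs are below) =====
def Claim_equal_format_day_range : Prop := ∀ (days : List String), Dom_format_day_range days → Spec_format_day_range days (format_day_range days)

-- ===== LEMMAS AND PROOFS =====

-- the two ports' dictionaries are the same literal
theorem bDayToNum_eq : bDayToNum = aDayToNum := rfl

-- proof helper: the OR-fold of the day bits over a list of numbers
def maskOf (L : List Int) : Nat := L.foldl (fun m v => m ||| bBit v) 0

-- every value the day dictionary can deliver is one of 1..7
theorem getD_mem_range (s : String) (h : aDayToNum.contains s = true) :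
    aDayToNum.getD s 0 ∈ ([1,2,3,4,5,6,7] : List Int) := by
  have hmk : aDayToNum = PySem.Dict.mk [("monday",1),("tuesday",2),("wednesday",3),
      ("thursday",4),("friday",5),("saturday",6),("sunday",7)] := rfl
  rw [hmk] at h ⊢
  simp [PySem.Dict.contains_mk] at h
  rcases h with h|h|h|h|h|h|h <;> subst h <;> decide

-- B's parse loop over the strings is the OR-fold over A's list of parsed numbers
theorem bmask_filter (days : List String) (m : Nat) :
    days.foldl (fun m day =>
      if aDayToNum.contains (PySem.Str.strip (PySem.Str.lower day))
      then m ||| bBit (aDayToNum.getD (PySem.Str.strip (PySem.Str.lower day)) 0) else m) m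
    = ((days.filter (fun d => aDayToNum.contains (PySem.Str.strip (PySem.Str.lower d)))).map
        (fun d => aDayToNum.getD (PySem.Str.strip (PySem.Str.lower d)) 0)).foldl
        (fun m v => m ||| bBit v) m := by
  induction days generalizing m with
  | nil => rfl
  | cons a t ih =>
    by_cases h : aDayToNum.contains (PySem.Str.strip (PySem.Str.lower a)) = true
    · simp [List.foldl_cons, h, ih]
    · simp [List.foldl_cons, h, ih]

-- bit i of the OR-fold: bit i of the start, or some element contributes bit i
theorem testBit_foldor (L : List Int) (m : Nat) (i : Nat) :
    ((L.foldl (fun m v => m ||| bBit v) m).testBit i)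
      = (m.testBit i || L.any (fun v => (bBit v).testBit i)) := by
  induction L generalizing m with
  | nil => simp
  | cons a t ih => simp [List.foldl_cons, ih, Nat.testBit_or, Bool.or_assoc]

-- the OR-fold depends only on the set of elements
theorem maskOf_eq_of_mem_iff (L u : List Int) (h : ∀ v, v ∈ L ↔ v ∈ u) :
    maskOf L = maskOf u := by
  apply Nat.eq_of_testBit_eq
  intro i
  unfold maskOf
  rw [testBit_foldor, testBit_foldor]
  simp only [Nat.zero_testBit, Bool.false_or]
  rw [Bool.eq_iff_iff]
  simp only [List.any_eq_true]
  exact ⟨fun ⟨v,hv,hp⟩ => ⟨v,(h v).mp hv,hp⟩, fun ⟨v,hv,hp⟩ => ⟨v,(h v).mpr hv,hp⟩⟩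

-- finite cores over the 128 strictly increasing lists over 1..7
set_option maxRecDepth 20000 in
theorem mask_ne_zero :
    ∀ u ∈ (([1,2,3,4,5,6,7] : List Int)).sublists, u ≠ [] → maskOf u ≠ 0 := by
  intro u hu
  fin_cases hu <;> decide

set_option maxRecDepth 20000 in
theorem formatMask_agree :
    ∀ u ∈ (([1,2,3,4,5,6,7] : List Int)).sublists, u ≠ [] →
      aFormatNums u = bFormatMask (maskOf u) := by
  intro u hu
  fin_cases hu <;> decide

theorem format_day_range_spec' (days : List String) :
    format_day_range days = format_day_range_alt days := by
  unfold format_day_range format_day_range_alt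
  by_cases hd : days = []
  · simp [hd]
  · simp only [if_neg hd]
    rw [PySem.List.foldl_append_if
      (fun day => aDayToNum.contains (PySem.Str.strip (PySem.Str.lower day)))
      (fun day => aDayToNum.getD (PySem.Str.strip (PySem.Str.lower day)) 0) days []]
    rw [bDayToNum_eq, bmask_filter]
    simp only [List.nil_append]
    set L := (days.filter (fun d => aDayToNum.contains (PySem.Str.strip (PySem.Str.lower d)))).map
      (fun d => aDayToNum.getD (PySem.Str.strip (PySem.Str.lower d)) 0) with hL
    by_cases hLnil : L = []
    · simp only [hLnil, if_pos trivial]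
      exact (if_pos rfl).symm
    · set u := PySem.List.sorted (PySem.Set.ofList L) (fun x => x) false with hu
      have hmem : ∀ v, v ∈ L ↔ v ∈ u := by
        intro v
        rw [hu, PySem.List.mem_sorted, PySem.Set.mem_ofList]
      have hunil : u ≠ [] := by
        intro hcon
        rw [hu, PySem.List.sorted_eq_nil_iff] at hcon
        have : L = [] := by
          cases hL' : L with
          | nil => rfl
          | cons a t =>
            exfalso
            have : a ∈ PySem.Set.ofList L := by
              rw [PySem.Set.mem_ofList]; simp [hL']
            simp [hcon] at this
        exact hLnil this
      have husub : u ∈ (([1,2,3,4,5,6,7] : List Int)).sublists := by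
        rw [List.mem_sublists]
        have hlt : u.Pairwise (· < ·) := PySem.List.sorted_ofList_pairwise_lt L
        have hsub : u ⊆ ([1,2,3,4,5,6,7] : List Int) := by
          intro x hx
          have hx' : x ∈ L := (hmem x).mpr hx
          rw [hL] at hx'
          simp only [List.mem_map, List.mem_filter] at hx'
          obtain ⟨d, ⟨_, hc⟩, hval⟩ := hx'
          rw [← hval]
          exact getD_mem_range _ hc
        haveI : Std.Antisymm ((· < ·) : Int → Int → Prop) :=
          ⟨fun a b h1 h2 => absurd h1 (lt_asymm h2)⟩
        exact List.sublist_of_subperm_of_pairwise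
          (List.Nodup.subperm (by exact hlt.imp ne_of_lt) hsub) hlt (by decide)
      have hmask : L.foldl (fun m v => m ||| bBit v) 0 = maskOf u :=
        maskOf_eq_of_mem_iff L u hmem
      rw [hmask]
      rw [if_neg hLnil, if_neg (mask_ne_zero u husub hunil)]
      exact formatMask_agree u husub hunil

-- ===== VERDICT (by name: the statement is the Claim_ definition above) =====
theorem format_day_range_spec : Claim_equal_format_day_range := by
  intro days _
  unfold Spec_format_day_range
  exact format_day_range_spec' days
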